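-- pv_equiv track=rewrite | github.com/austinv211/Amuse-Bouche-Implementation | Part2d.py | findAfterStarIter
-- ===== SOURCE A (Python) =====
-- from typing import Optional
--
-- def findAfterStarIter(str: str) -> Optional[str]:
--     if len(str) <= 1:
--         return None
--
--     last = None
--     for c in str:  # Cleaner than i in range(len(str) - 1)
--         if last is '*':
--             return c
--         last = c
--     return None
-- ===== SOURCE B (Python) =====
-- from typing import Optional
--
-- def findAfterStarIter(str: str) -> Optional[str]:
--     _, sep, tail = str.partition('*')
--     if sep == '' or tail == '':
--         return None
--     return tail[0]
-- ===== Notes on version B (the rewrite author's own statement) =====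
-- stated objective: simpler
-- what changed: Replaced the char-by-char scan with previous-char state by a single str.partition('*') split, returning the first char of the tail (which subsumes A's short-string guard).
import Mathlib
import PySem

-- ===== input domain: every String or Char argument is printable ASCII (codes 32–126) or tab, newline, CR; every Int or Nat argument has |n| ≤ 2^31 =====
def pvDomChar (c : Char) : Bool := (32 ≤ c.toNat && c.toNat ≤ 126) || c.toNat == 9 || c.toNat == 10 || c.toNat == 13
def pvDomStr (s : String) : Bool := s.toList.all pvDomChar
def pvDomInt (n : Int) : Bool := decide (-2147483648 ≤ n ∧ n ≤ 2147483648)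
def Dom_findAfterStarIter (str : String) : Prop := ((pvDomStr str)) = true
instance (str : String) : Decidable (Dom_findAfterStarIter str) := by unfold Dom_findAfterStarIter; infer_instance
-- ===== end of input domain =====

-- B replaces A's scan-with-previous-char loop by a partition('*')-then-index decomposition (objective: simpler).

-- ===== PORT A =====
-- the for-loop over the string's characters, carrying `last : Option Char`
def pvLoopA : List Char → Option Char → Option String
  | [], _ => none
  | c :: cs, last =>
      if last = some '*' then some (String.ofList [c]) else pvLoopA cs (some c)

def findAfterStarIter (str : String) : Option String :=
  if str.toList.length ≤ 1 then none
  else pvLoopA str.toList none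

-- ===== PORT B =====
-- str.partition('*'): tail = what follows the first '*' (empty sep ↔ no '*')
def findAfterStarIter_alt (str : String) : Option String :=
  match str.toList.dropWhile (fun c => c ≠ '*') with
  | [] => none                      -- sep == '' : no '*' in str
  | _ :: tail =>
      match tail with
      | [] => none                  -- tail == ''
      | c :: _ => some (String.ofList [c])   -- tail[0]

-- ===== PRECONDITION & SPEC =====
def Spec_findAfterStarIter (str : String) (out : Option String) : Prop := out = findAfterStarIter_alt str
instance (str : String) (out : Option String) : Decidable (Spec_findAfterStarIter str out) := by unfold Spec_findAfterStarIter; infer_instance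

-- ===== CLAIM (what is proved, stated in full; the proofs are below) =====
def Claim_equal_findAfterStarIter : Prop := ∀ (str : String), Dom_findAfterStarIter str → Spec_findAfterStarIter str (findAfterStarIter str)

-- ===== LEMMAS AND PROOFS =====

-- B's core on the character list
def pvCoreB (l : List Char) : Option String :=
  match l.dropWhile (fun c => c ≠ '*') with
  | [] => none
  | _ :: tail =>
      match tail with
      | [] => none
      | c :: _ => some (String.ofList [c])

theorem pvLoopA_ne_star (cs : List Char) (c : Char) (h : c ≠ '*') :
    pvLoopA cs (some c) = pvLoopA cs none := by
  cases cs with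
  | nil => rfl
  | cons d ds =>
      simp [pvLoopA, h]

theorem pvLoopA_none_eq_core (l : List Char) : pvLoopA l none = pvCoreB l := by
  induction l with
  | nil => rfl
  | cons c cs ih =>
      by_cases h : c = '*'
      · subst h
        cases cs with
        | nil => rfl
        | cons d ds => simp [pvLoopA, pvCoreB, List.dropWhile]
      · simp only [pvLoopA, pvCoreB, List.dropWhile, h, decide_eq_true_eq,
          Bool.not_false, if_neg (Option.some.injEq c '*' ▸ h)]
        rw [pvLoopA_ne_star cs c h, ih]
        simp [pvCoreB, h]

theorem pvCoreB_short (l : List Char) (h : l.length ≤ 1) : pvCoreB l = none := by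
  match l, h with
  | [], _ => rfl
  | [a], _ =>
      by_cases ha : a = '*' <;> simp [pvCoreB, List.dropWhile, ha]

-- ===== VERDICT (by name: the statement is the Claim_ definition above) =====
theorem findAfterStarIter_spec : Claim_equal_findAfterStarIter := by
  intro s _
  show findAfterStarIter s = findAfterStarIter_alt s
  have hB : findAfterStarIter_alt s = pvCoreB s.toList := rfl
  unfold findAfterStarIter
  rw [hB]
  split_ifs with h
  · exact (pvCoreB_short _ h).symm
  · exact pvLoopA_none_eq_core _
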